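-- pv_equiv track=rewrite | github.com/Puroktor/LittlePyProjects | Task2/main.py | is_specific_ordered_sequence
-- ===== SOURCE A (Python) =====
-- def is_specific_ordered_sequence(matrix):
--     if not matrix or not matrix[0]:
--         return True
--     increasing = decreasing = True
--     h = len(matrix)
--     last = matrix[0][0]
--     for i in range(h):
--         j_range = range(0, len(matrix[i])) if i % 2 == 0 else range(len(matrix[i]) - 1, -1, -1)
--         for j in j_range:
--             if matrix[i][j] < last:
--                 increasing = False
--             elif matrix[i][j] > last:
--                 decreasing = False
--             last = matrix[i][j]
--     return increasing or decreasing
-- ===== SOURCE B (Python) =====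
-- def is_specific_ordered_sequence(matrix):
--     if not matrix or not matrix[0]:
--         return True
--     seq = []
--     for i, row in enumerate(matrix):
--         seq.extend(row if i % 2 == 0 else row[::-1])
--     increasing = all(seq[k - 1] <= seq[k] for k in range(1, len(seq)))
--     decreasing = all(seq[k - 1] >= seq[k] for k in range(1, len(seq)))
--     return increasing or decreasing
-- ===== Notes on version B (the rewrite author's own statement) =====
-- stated objective: simpler
-- what changed: Replaces the interleaved index-juggling pass (manual j_range direction, one mutable last/increasing/decreasing state) with a flatten-the-snake-into-a-list step followed by two plain adjacent-pair monotonicity checks.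
import Mathlib
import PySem

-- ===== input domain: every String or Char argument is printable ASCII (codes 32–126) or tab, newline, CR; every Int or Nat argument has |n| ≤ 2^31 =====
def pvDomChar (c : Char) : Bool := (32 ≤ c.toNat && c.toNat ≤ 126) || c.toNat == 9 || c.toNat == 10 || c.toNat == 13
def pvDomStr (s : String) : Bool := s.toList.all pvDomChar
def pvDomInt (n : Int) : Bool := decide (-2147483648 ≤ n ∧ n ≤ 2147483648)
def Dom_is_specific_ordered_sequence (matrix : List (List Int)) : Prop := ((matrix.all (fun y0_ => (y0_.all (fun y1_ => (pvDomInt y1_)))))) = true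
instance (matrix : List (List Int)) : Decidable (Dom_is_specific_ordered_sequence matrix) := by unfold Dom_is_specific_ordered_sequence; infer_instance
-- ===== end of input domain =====

-- B replaces A's single interleaved index-direction pass (mutable increasing/decreasing/last
-- state, manual forward/backward j ranges) with a flatten-the-snake step followed by two plain
-- adjacent-pair monotonicity checks; same behaviour and asymptotic cost, plainer decomposition.

-- ===== PORT A =====
-- literal port: outer loop over range(h) indexing matrix[i]; inner loop over j_range
-- (a forward or a countdown range) indexing matrix[i][j]; state (increasing, decreasing, last).
def is_specific_ordered_sequence (matrix : List (List Int)) : Bool :=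
  match matrix with
  | [] => true
  | row0 :: _ =>
    match row0 with
    | [] => true
    | x0 :: _ =>
      let h : Int := matrix.length
      let st :=
        (PySem.List.pyRange 0 h 1).foldl (fun (st : Bool × Bool × Int) i =>
          let row := PySem.List.pyGetD matrix i []
          let jr := if PySem.Int.mod i 2 = 0
                    then PySem.List.pyRange 0 (row.length : Int) 1
                    else PySem.List.pyRange ((row.length : Int) - 1) (-1) (-1)
          jr.foldl (fun (st : Bool × Bool × Int) j =>
            let v := PySem.List.pyGetD row j 0
            let increasing := if v < st.2.2 then false else st.1
            let decreasing := if v < st.2.2 then st.2.1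
                              else if v > st.2.2 then false else st.2.1
            (increasing, decreasing, v)) st)
          (true, true, x0)
      st.1 || st.2.1

-- ===== PORT B =====
-- helpers for Source B's two `all(...)` adjacent-pair comparisons
def pvNonDec : List Int → Bool
  | a :: b :: t => decide (a ≤ b) && pvNonDec (b :: t)
  | _ => true

def pvNonInc : List Int → Bool
  | a :: b :: t => decide (b ≤ a) && pvNonInc (b :: t)
  | _ => true

-- Source B's flattening loop: seq.extend(row if i % 2 == 0 else row[::-1]) over enumerate(matrix)
def pvSnake (matrix : List (List Int)) : List Int :=
  (PySem.List.enumerate matrix 0).foldl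
    (fun acc p => acc ++ (if PySem.Int.mod p.1 2 = 0 then p.2 else p.2.reverse)) []

def is_specific_ordered_sequence_alt (matrix : List (List Int)) : Bool :=
  match matrix with
  | [] => true
  | row0 :: _ =>
    match row0 with
    | [] => true
    | _ :: _ =>
      let seq := pvSnake matrix
      pvNonDec seq || pvNonInc seq

-- ===== PRECONDITION & SPEC =====
def Spec_is_specific_ordered_sequence (matrix : List (List Int)) (out : Bool) : Prop := out = is_specific_ordered_sequence_alt matrix
instance (matrix : List (List Int)) (out : Bool) : Decidable (Spec_is_specific_ordered_sequence matrix out) := by unfold Spec_is_specific_ordered_sequence; infer_instance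

-- ===== CLAIM (what is proved, stated in full; the proofs are below) =====
def Claim_equal_is_specific_ordered_sequence : Prop := ∀ (matrix : List (List Int)), Dom_is_specific_ordered_sequence matrix → Spec_is_specific_ordered_sequence matrix (is_specific_ordered_sequence matrix)

-- ===== LEMMAS AND PROOFS =====

-- A's inner-loop step, in simplified (last ≤ v / v ≤ last) form
def pvStep (st : Bool × Bool × Int) (v : Int) : Bool × Bool × Int :=
  (st.1 && decide (st.2.2 ≤ v), st.2.1 && decide (v ≤ st.2.2), v)

theorem pvStep_eq (st : Bool × Bool × Int) (v : Int) :
    ((if v < st.2.2 then false else st.1,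
      if v < st.2.2 then st.2.1 else if v > st.2.2 then false else st.2.1,
      v) : Bool × Bool × Int) = pvStep st v := by
  rcases st with ⟨i, d, l⟩
  simp only [pvStep]
  by_cases h1 : v < l
  · simp [h1, show ¬ (l ≤ v) from by omega, show v ≤ l from by omega]
  · by_cases h2 : v > l
    · simp [h1, h2, show l ≤ v from by omega, show ¬ (v ≤ l) from by omega]
    · simp [h1, h2, show l ≤ v from by omega, show v ≤ l from by omega]

-- rewrite the literal inner lambda of port A into pvStep form
theorem lit_inner (row : List Int) :
    (fun (st : Bool × Bool × Int) (j : Int) =>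
      ((if PySem.List.pyGetD row j 0 < st.2.2 then false else st.1,
        if PySem.List.pyGetD row j 0 < st.2.2 then st.2.1
        else if PySem.List.pyGetD row j 0 > st.2.2 then false else st.2.1,
        PySem.List.pyGetD row j 0) : Bool × Bool × Int))
    = (fun (st : Bool × Bool × Int) (j : Int) => pvStep st (PySem.List.pyGetD row j 0)) := by
  funext st j
  exact pvStep_eq st (PySem.List.pyGetD row j 0)

-- monotonicity flags and last element of a fold of pvStep
def pvND (last : Int) : List Int → Bool
  | [] => true
  | x :: t => decide (last ≤ x) && pvND x t

def pvNI (last : Int) : List Int → Bool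
  | [] => true
  | x :: t => decide (x ≤ last) && pvNI x t

def pvLast (last : Int) : List Int → Int
  | [] => last
  | x :: t => pvLast x t

theorem foldl_pvStep (l : List Int) (inc dec : Bool) (last : Int) :
    l.foldl pvStep (inc, dec, last)
      = (inc && pvND last l, dec && pvNI last l, pvLast last l) := by
  induction l generalizing inc dec last with
  | nil => simp [pvND, pvNI, pvLast]
  | cons x t ih =>
    simp [pvStep, pvND, pvNI, pvLast, ih, Bool.and_assoc]

theorem pvNonDec_eq (a : Int) (t : List Int) : pvNonDec (a :: t) = pvND a t := by
  induction t generalizing a with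
  | nil => simp [pvNonDec, pvND]
  | cons b s ih => simp [pvNonDec, pvND, ih]

theorem pvNonInc_eq (a : Int) (t : List Int) : pvNonInc (a :: t) = pvNI a t := by
  induction t generalizing a with
  | nil => simp [pvNonInc, pvNI]
  | cons b s ih => simp [pvNonInc, pvNI, ih]

-- the snake as a flatMap of per-row direction
def pvDir (p : Int × List Int) : List Int :=
  if PySem.Int.mod p.1 2 = 0 then p.2 else p.2.reverse

theorem pvSnake_eq (matrix : List (List Int)) :
    pvSnake matrix = (PySem.List.enumerate matrix 0).flatMap pvDir := by
  simp only [pvSnake]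
  have h := PySem.List.foldl_append_eq_flatMap pvDir (PySem.List.enumerate matrix 0) []
  simpa [pvDir] using h

-- forward index fold = fold of pvStep over the row
theorem foldl_forward (row : List Int) (st : Bool × Bool × Int) :
    (PySem.List.pyRange 0 (row.length : Int) 1).foldl
      (fun st j => pvStep st (PySem.List.pyGetD row j 0)) st
      = row.foldl pvStep st :=
  PySem.List.foldl_pyRange_zero_pyGetD' row 0 pvStep st

-- countdown index fold = fold of pvStep over the reversed row
theorem foldl_countdown (row : List Int) (st : Bool × Bool × Int) :
    (PySem.List.pyRange ((row.length : Int) - 1) (-1) (-1)).foldl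
      (fun st j => pvStep st (PySem.List.pyGetD row j 0)) st
      = row.reverse.foldl pvStep st := by
  have e1 : ((-1 : Int) + 1) = 0 := by omega
  have e2 : ((row.length : Int) - 1 + 1) = (row.length : Int) := by omega
  calc (PySem.List.pyRange ((row.length : Int) - 1) (-1) (-1)).foldl
        (fun st j => pvStep st (PySem.List.pyGetD row j 0)) st
      = ((PySem.List.pyRange 0 ((row.length : Int)) 1).reverse).foldl
        (fun st j => pvStep st (PySem.List.pyGetD row j 0)) st := by
        rw [PySem.List.pyRange_neg_one_eq_reverse, e1, e2]
    _ = (((PySem.List.pyRange 0 ((row.length : Int)) 1).reverse).map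
          (fun j => PySem.List.pyGetD row j 0)).foldl pvStep st :=
        (List.foldl_map).symm
    _ = (((PySem.List.pyRange 0 ((row.length : Int)) 1).map
          (fun j => PySem.List.pyGetD row j 0)).reverse).foldl pvStep st := by
        rw [List.map_reverse]
    _ = row.reverse.foldl pvStep st := by
        rw [PySem.List.map_pyGetD_pyRange_zero']

-- A's per-row body, as a function of the (index, row) pair
def pvRowFold (st : Bool × Bool × Int) (p : Int × List Int) : Bool × Bool × Int :=
  (if PySem.Int.mod p.1 2 = 0
   then PySem.List.pyRange 0 (p.2.length : Int) 1
   else PySem.List.pyRange ((p.2.length : Int) - 1) (-1) (-1)).foldl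
    (fun st j => pvStep st (PySem.List.pyGetD p.2 j 0)) st

theorem pvRowFold_eq (st : Bool × Bool × Int) (p : Int × List Int) :
    pvRowFold st p = (pvDir p).foldl pvStep st := by
  unfold pvRowFold pvDir
  by_cases h : PySem.Int.mod p.1 2 = 0
  · simp only [if_pos h]; exact foldl_forward p.2 st
  · simp only [if_neg h]; exact foldl_countdown p.2 st

-- folding A's per-row body over the enumerated rows = folding pvStep over the snake
theorem snake_fold (m : List (List Int)) (s : Int) (st : Bool × Bool × Int) :
    (PySem.List.enumerate m s).foldl pvRowFold st
      = ((PySem.List.enumerate m s).flatMap pvDir).foldl pvStep st := by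
  induction m generalizing s st with
  | nil => simp [PySem.List.enumerate_nil]
  | cons x xs ih =>
    rw [PySem.List.enumerate_cons]
    simp only [List.foldl_cons, List.flatMap_cons, List.foldl_append]
    rw [pvRowFold_eq, ih]

-- A's outer index loop = the fold over the enumerated rows
theorem outer_eq (m : List (List Int)) (init : Bool × Bool × Int) :
    (PySem.List.pyRange 0 (m.length : Int) 1).foldl
      (fun st i => pvRowFold st (i, PySem.List.pyGetD m i [])) init
      = ((PySem.List.enumerate m 0).flatMap pvDir).foldl pvStep init := by
  have h1 : PySem.List.enumerate m 0
      = (PySem.List.pyRange 0 (m.length : Int) 1).map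
          (fun j => (j, PySem.List.pyGetD m j [])) := by
    have := PySem.List.enumerate_eq_map_pyRange m []
    simpa using this
  calc (PySem.List.pyRange 0 (m.length : Int) 1).foldl
        (fun st i => pvRowFold st (i, PySem.List.pyGetD m i [])) init
      = ((PySem.List.pyRange 0 (m.length : Int) 1).map
          (fun j => (j, PySem.List.pyGetD m j []))).foldl pvRowFold init :=
        (List.foldl_map).symm
    _ = (PySem.List.enumerate m 0).foldl pvRowFold init := by rw [h1]
    _ = ((PySem.List.enumerate m 0).flatMap pvDir).foldl pvStep init := snake_fold m 0 init

-- the snake of a matrix whose first row starts with x0 starts with x0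
theorem seq_head (x0 : Int) (t : List Int) (rest : List (List Int)) :
    (PySem.List.enumerate ((x0 :: t) :: rest) 0).flatMap pvDir
      = x0 :: (t ++ (PySem.List.enumerate rest 1).flatMap pvDir) := by
  rw [PySem.List.enumerate_cons, List.flatMap_cons]
  have h0 : pvDir ((0 : Int), x0 :: t) = x0 :: t := by
    simp [pvDir, PySem.Int.mod]
  rw [h0]
  simp

-- ===== VERDICT (by name: the statement is the Claim_ definition above) =====
theorem is_specific_ordered_sequence_spec : Claim_equal_is_specific_ordered_sequence := by
  intro matrix _
  unfold Spec_is_specific_ordered_sequence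
  match matrix with
  | [] => rfl
  | [] :: rest => rfl
  | (x0 :: t) :: rest =>
    show (let h : Int := ((x0 :: t) :: rest).length
          let st :=
            (PySem.List.pyRange 0 h 1).foldl (fun (st : Bool × Bool × Int) i =>
              let row := PySem.List.pyGetD ((x0 :: t) :: rest) i []
              let jr := if PySem.Int.mod i 2 = 0
                        then PySem.List.pyRange 0 (row.length : Int) 1
                        else PySem.List.pyRange ((row.length : Int) - 1) (-1) (-1)
              jr.foldl (fun (st : Bool × Bool × Int) j =>
                let v := PySem.List.pyGetD row j 0
                let increasing := if v < st.2.2 then false else st.1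
                let decreasing := if v < st.2.2 then st.2.1
                                  else if v > st.2.2 then false else st.2.1
                (increasing, decreasing, v)) st)
              (true, true, x0)
          st.1 || st.2.1)
        = (let seq := pvSnake ((x0 :: t) :: rest)
           pvNonDec seq || pvNonInc seq)
    simp only [lit_inner]
    show (((PySem.List.pyRange 0 ((((x0 :: t) :: rest).length : Int)) 1).foldl
            (fun st i => pvRowFold st (i, PySem.List.pyGetD ((x0 :: t) :: rest) i []))
            (true, true, x0)).1
          || ((PySem.List.pyRange 0 ((((x0 :: t) :: rest).length : Int)) 1).foldl
            (fun st i => pvRowFold st (i, PySem.List.pyGetD ((x0 :: t) :: rest) i []))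
            (true, true, x0)).2.1)
         = (pvNonDec (pvSnake ((x0 :: t) :: rest)) || pvNonInc (pvSnake ((x0 :: t) :: rest)))
    rw [outer_eq, pvSnake_eq, seq_head]
    rw [pvNonDec_eq, pvNonInc_eq]
    rw [show (x0 :: (t ++ (PySem.List.enumerate rest 1).flatMap pvDir)).foldl pvStep (true, true, x0)
          = ((t ++ (PySem.List.enumerate rest 1).flatMap pvDir)).foldl pvStep
              (pvStep (true, true, x0) x0) from List.foldl_cons ..]
    rw [show pvStep (true, true, x0) x0 = (true, true, x0) from by simp [pvStep]]
    rw [foldl_pvStep]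
    simp
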